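-- pv_equiv track=rewrite | github.com/JesseWebDotCom/loki-doki | v2/orchestrator/skills/holidays.py | _extract_country
-- ===== SOURCE A (Python) =====
-- from typing import Any
--
-- _COUNTRY_ALIASES = {
--     "us": "US",
--     "usa": "US",
--     "united states": "US",
--     "america": "US",
--     "japan": "JP",
--     "jp": "JP",
--     "australia": "AU",
--     "au": "AU",
--     "canada": "CA",
--     "ca": "CA",
--     "uk": "GB",
--     "united kingdom": "GB",
--     "britain": "GB",
--     "england": "GB",
-- }
--
-- def _extract_country(text: str, explicit: dict[str, Any]) -> str:
--     value = explicit.get("country")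
--     if value:
--         return _COUNTRY_ALIASES.get(str(value).lower().strip(), str(value).upper().strip())
--     lower = text.lower()
--     for alias, code in sorted(_COUNTRY_ALIASES.items(), key=lambda item: len(item[0]), reverse=True):
--         if alias in lower:
--             return code
--     return "US"
-- ===== SOURCE B (Python) =====
-- from typing import Any
--
-- _COUNTRY_ALIASES = {
--     "us": "US",
--     "usa": "US",
--     "united states": "US",
--     "america": "US",
--     "japan": "JP",
--     "jp": "JP",
--     "australia": "AU",
--     "au": "AU",
--     "canada": "CA",
--     "ca": "CA",
--     "uk": "GB",
--     "united kingdom": "GB",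
--     "britain": "GB",
--     "england": "GB",
-- }
--
-- def _extract_country(text: str, explicit: dict[str, Any]) -> str:
--     value = explicit.get("country")
--     if value:
--         return _COUNTRY_ALIASES.get(str(value).lower().strip(), str(value).upper().strip())
--     lower = text.lower()
--     best = None
--     for alias, code in _COUNTRY_ALIASES.items():
--         if alias in lower and (best is None or len(alias) > len(best[0])):
--             best = (alias, code)
--     return best[1] if best is not None else "US"
-- ===== Notes on version B (the rewrite author's own statement) =====
-- stated objective: simpler
-- what changed: The text fallback no longer sorts the alias dict by length: B does a single pass over _COUNTRY_ALIASES in insertion order tracking the strictly-longest matching alias, which reproduces A's longest-match/insertion-order tie-breaking without the sort.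
import Mathlib
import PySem

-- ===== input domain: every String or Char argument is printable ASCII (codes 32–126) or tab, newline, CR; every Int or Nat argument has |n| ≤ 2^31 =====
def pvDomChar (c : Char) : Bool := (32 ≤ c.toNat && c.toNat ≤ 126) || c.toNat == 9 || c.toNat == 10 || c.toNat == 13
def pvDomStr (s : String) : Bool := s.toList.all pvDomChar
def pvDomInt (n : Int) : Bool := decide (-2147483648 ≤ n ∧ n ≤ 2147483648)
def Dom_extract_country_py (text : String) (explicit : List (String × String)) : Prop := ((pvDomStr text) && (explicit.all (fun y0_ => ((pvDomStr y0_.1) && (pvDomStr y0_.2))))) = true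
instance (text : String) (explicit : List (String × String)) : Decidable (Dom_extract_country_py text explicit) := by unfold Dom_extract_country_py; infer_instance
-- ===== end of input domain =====

-- B replaces A's sort-by-length-then-first-substring-match fallback with a single best-tracking
-- pass over the alias dict in insertion order (objective: simpler — no sort of the constant dict).

-- the module constant _COUNTRY_ALIASES (shared by both Pythons)
def pvAliases : PySem.Dict String String :=
  PySem.Dict.ofList [("us", "US"), ("usa", "US"), ("united states", "US"), ("america", "US"), ("japan", "JP"), ("jp", "JP"), ("australia", "AU"), ("au", "AU"), ("canada", "CA"), ("ca", "CA"), ("uk", "GB"), ("united kingdom", "GB"), ("britain", "GB"), ("england", "GB")]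

-- ===== PORT A =====
-- the 'for alias, code in sorted(...)' loop of A: first alias contained in lower wins
def pvFirstMatch (lower : String) : List (String × String) → String
  | [] => "US"
  | (alias_, code) :: rest => if PySem.Str.isIn alias_ lower then code else pvFirstMatch lower rest

def pvFallbackA (text : String) : String :=
  pvFirstMatch (PySem.Str.lower text)
    (PySem.List.sorted pvAliases.items (fun item => PySem.Str.len item.1) true)

def extract_country_py (text : String) (explicit : List (String × String)) : String :=
  match (PySem.Dict.mk explicit).get? "country" with
  | some v =>
      if v = "" then pvFallbackA text   -- 'if value:' — empty string is falsy
      else pvAliases.getD (PySem.Str.strip (PySem.Str.lower v)) (PySem.Str.strip (PySem.Str.upper v))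
  | none => pvFallbackA text

-- ===== PORT B =====
-- B's loop body: keep the matching alias of strictly greatest length seen so far
def pvUpd (lower : String) (best : Option (String × String)) (e : String × String) :
    Option (String × String) :=
  if PySem.Str.isIn e.1 lower &&
      (match best with
       | none => true
       | some b => decide (PySem.Str.len b.1 < PySem.Str.len e.1)) then some e else best

def pvFallbackB (text : String) : String :=
  match pvAliases.items.foldl (pvUpd (PySem.Str.lower text)) none with
  | some b => b.2
  | none => "US"

def extract_country_py_alt (text : String) (explicit : List (String × String)) : String :=
  match (PySem.Dict.mk explicit).get? "country" with
  | some v =>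
      if v = "" then pvFallbackB text
      else pvAliases.getD (PySem.Str.strip (PySem.Str.lower v)) (PySem.Str.strip (PySem.Str.upper v))
  | none => pvFallbackB text

-- ===== PRECONDITION & SPEC =====
def Spec_extract_country_py (text : String) (explicit : List (String × String)) (out : String) : Prop := out = extract_country_py_alt text explicit
instance (text : String) (explicit : List (String × String)) (out : String) : Decidable (Spec_extract_country_py text explicit out) := by unfold Spec_extract_country_py; infer_instance

-- ===== CLAIM (what is proved, stated in full; the proofs are below) =====
def Claim_equal_extract_country_py : Prop := ∀ (text : String) (explicit : List (String × String)), Dom_extract_country_py text explicit → Spec_extract_country_py text explicit (extract_country_py text explicit)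

-- ===== LEMMAS AND PROOFS =====

-- B's update steps commute for entries of different alias length
lemma pvUpd_comm (lower : String) (s : Option (String × String)) (a b : String × String)
    (h : PySem.Str.len a.1 ≠ PySem.Str.len b.1) :
    pvUpd lower (pvUpd lower s a) b = pvUpd lower (pvUpd lower s b) a := by
  simp only [ne_eq, PySem.Str.len_eq] at h
  rcases s with _ | p <;>
    by_cases ha : PySem.Chars.isIn a.1.toList lower.toList <;>
    by_cases hb : PySem.Chars.isIn b.1.toList lower.toList <;>
    simp_all [pvUpd] <;> split_ifs <;> simp_all <;> omega

-- once the best entry dominates every remaining alias length, the fold never changes it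
lemma pvFold_stay (lower : String) (a : String) (c : String) :
    ∀ t : List (String × String), (∀ x ∈ t, PySem.Str.len x.1 ≤ PySem.Str.len a) →
      t.foldl (pvUpd lower) (some (a, c)) = some (a, c) := by
  intro t
  induction t with
  | nil => intro _; rfl
  | cons y ys ih =>
      intro hle
      have hy : PySem.Str.len y.1 ≤ PySem.Str.len a := hle y (by simp)
      simp at hy
      have hstep : pvUpd lower (some (a, c)) y = some (a, c) := by
        simp only [pvUpd]
        split_ifs with hcond
        · exfalso; simp at hcond; omega
        · rfl
      simp only [List.foldl_cons, hstep]
      exact ih (fun x hx => hle x (by simp [hx]))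

-- on a length-nonincreasing list, A's first-match scan equals B's best-tracking fold
lemma pvFirst_eq_fold (lower : String) :
    ∀ l : List (String × String),
      l.Pairwise (fun x y => PySem.Str.len y.1 ≤ PySem.Str.len x.1) →
      pvFirstMatch lower l =
        (match l.foldl (pvUpd lower) none with | some b => b.2 | none => "US") := by
  intro l
  induction l with
  | nil => intro _; rfl
  | cons y ys ih =>
      intro hp
      rcases List.pairwise_cons.mp hp with ⟨hdom, htail⟩
      by_cases hin : PySem.Chars.isIn y.1.toList lower.toList
      · have h1 : pvUpd lower none y = some y := by simp [pvUpd, hin]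
        simp only [pvFirstMatch, List.foldl_cons, h1, PySem.Str.isIn_eq, hin, if_pos]
        rw [show (y : String × String) = (y.1, y.2) from rfl, pvFold_stay lower y.1 y.2 ys hdom]
      · have h1 : pvUpd lower none y = none := by simp [pvUpd, hin]
        simp only [pvFirstMatch, List.foldl_cons, h1, PySem.Str.isIn_eq, hin, if_neg,
          Bool.false_eq_true, not_false_iff]
        exact ih htail

-- the concrete items list and its sorted form
lemma pvItems_eq : pvAliases.items = [("us", "US"), ("usa", "US"), ("united states", "US"), ("america", "US"), ("japan", "JP"), ("jp", "JP"), ("australia", "AU"), ("au", "AU"), ("canada", "CA"), ("ca", "CA"), ("uk", "GB"), ("united kingdom", "GB"), ("britain", "GB"), ("england", "GB")] := by decide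

lemma pvSortedItems :
    PySem.List.sorted pvAliases.items (fun item => PySem.Str.len item.1) true =
      [("united kingdom", "GB"), ("united states", "US"), ("australia", "AU"), ("america", "US"), ("britain", "GB"), ("england", "GB"), ("canada", "CA"), ("japan", "JP"), ("usa", "US"), ("us", "US"), ("jp", "JP"), ("au", "AU"), ("ca", "CA"), ("uk", "GB")] := by decide

-- the fold over insertion order equals the fold over the sorted order (adjacent commutations)
lemma pvPerm_fold (lower : String) (s : Option (String × String)) :
    pvAliases.items.foldl (pvUpd lower) s =
      List.foldl (pvUpd lower) s [("united kingdom", "GB"), ("united states", "US"), ("australia", "AU"), ("america", "US"), ("britain", "GB"), ("england", "GB"), ("canada", "CA"), ("japan", "JP"), ("usa", "US"), ("us", "US"), ("jp", "JP"), ("au", "AU"), ("ca", "CA"), ("uk", "GB")] := by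
  rw [pvItems_eq]
  simp only [List.foldl_cons, List.foldl_nil]
  rw [pvUpd_comm lower _ ("us", "US") ("usa", "US") (by decide)]
  rw [pvUpd_comm lower _ ("us", "US") ("united states", "US") (by decide)]
  rw [pvUpd_comm lower _ ("us", "US") ("america", "US") (by decide)]
  rw [pvUpd_comm lower _ ("us", "US") ("japan", "JP") (by decide)]
  rw [pvUpd_comm lower _ ("jp", "JP") ("australia", "AU") (by decide)]
  rw [pvUpd_comm lower _ ("au", "AU") ("canada", "CA") (by decide)]
  rw [pvUpd_comm lower _ ("uk", "GB") ("united kingdom", "GB") (by decide)]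
  rw [pvUpd_comm lower _ ("uk", "GB") ("britain", "GB") (by decide)]
  rw [pvUpd_comm lower _ ("uk", "GB") ("england", "GB") (by decide)]
  rw [pvUpd_comm lower _ ("usa", "US") ("united states", "US") (by decide)]
  rw [pvUpd_comm lower _ ("usa", "US") ("america", "US") (by decide)]
  rw [pvUpd_comm lower _ ("usa", "US") ("japan", "JP") (by decide)]
  rw [pvUpd_comm lower _ ("us", "US") ("australia", "AU") (by decide)]
  rw [pvUpd_comm lower _ ("jp", "JP") ("canada", "CA") (by decide)]
  rw [pvUpd_comm lower _ ("ca", "CA") ("united kingdom", "GB") (by decide)]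
  rw [pvUpd_comm lower _ ("ca", "CA") ("britain", "GB") (by decide)]
  rw [pvUpd_comm lower _ ("ca", "CA") ("england", "GB") (by decide)]
  rw [pvUpd_comm lower _ ("usa", "US") ("australia", "AU") (by decide)]
  rw [pvUpd_comm lower _ ("us", "US") ("canada", "CA") (by decide)]
  rw [pvUpd_comm lower _ ("au", "AU") ("united kingdom", "GB") (by decide)]
  rw [pvUpd_comm lower _ ("au", "AU") ("britain", "GB") (by decide)]
  rw [pvUpd_comm lower _ ("au", "AU") ("england", "GB") (by decide)]
  rw [pvUpd_comm lower _ ("japan", "JP") ("australia", "AU") (by decide)]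
  rw [pvUpd_comm lower _ ("usa", "US") ("canada", "CA") (by decide)]
  rw [pvUpd_comm lower _ ("jp", "JP") ("united kingdom", "GB") (by decide)]
  rw [pvUpd_comm lower _ ("jp", "JP") ("britain", "GB") (by decide)]
  rw [pvUpd_comm lower _ ("jp", "JP") ("england", "GB") (by decide)]
  rw [pvUpd_comm lower _ ("america", "US") ("australia", "AU") (by decide)]
  rw [pvUpd_comm lower _ ("japan", "JP") ("canada", "CA") (by decide)]
  rw [pvUpd_comm lower _ ("us", "US") ("united kingdom", "GB") (by decide)]
  rw [pvUpd_comm lower _ ("us", "US") ("britain", "GB") (by decide)]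
  rw [pvUpd_comm lower _ ("us", "US") ("england", "GB") (by decide)]
  rw [pvUpd_comm lower _ ("usa", "US") ("united kingdom", "GB") (by decide)]
  rw [pvUpd_comm lower _ ("usa", "US") ("britain", "GB") (by decide)]
  rw [pvUpd_comm lower _ ("usa", "US") ("england", "GB") (by decide)]
  rw [pvUpd_comm lower _ ("japan", "JP") ("united kingdom", "GB") (by decide)]
  rw [pvUpd_comm lower _ ("japan", "JP") ("britain", "GB") (by decide)]
  rw [pvUpd_comm lower _ ("japan", "JP") ("england", "GB") (by decide)]
  rw [pvUpd_comm lower _ ("canada", "CA") ("united kingdom", "GB") (by decide)]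
  rw [pvUpd_comm lower _ ("canada", "CA") ("britain", "GB") (by decide)]
  rw [pvUpd_comm lower _ ("canada", "CA") ("england", "GB") (by decide)]
  rw [pvUpd_comm lower _ ("america", "US") ("united kingdom", "GB") (by decide)]
  rw [pvUpd_comm lower _ ("australia", "AU") ("united kingdom", "GB") (by decide)]
  rw [pvUpd_comm lower _ ("united states", "US") ("united kingdom", "GB") (by decide)]

lemma pvFallback_eq (text : String) : pvFallbackA text = pvFallbackB text := by
  unfold pvFallbackA pvFallbackB
  rw [pvSortedItems, pvFirst_eq_fold (PySem.Str.lower text) _ (by decide), pvPerm_fold]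

-- ===== VERDICT (by name: the statement is the Claim_ definition above) =====
theorem extract_country_py_spec : Claim_equal_extract_country_py := by
  intro text explicit _
  unfold Spec_extract_country_py extract_country_py extract_country_py_alt
  cases h : (PySem.Dict.mk explicit).get? "country" with
  | none => simp [pvFallback_eq]
  | some v =>
      by_cases hv : v = "" <;> simp [hv, pvFallback_eq]
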